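-- pv_equiv track=rewrite | github.com/kazkitou/exercise_python_it | sampleproject/www/Project_Euler/problem031.py | get_pattern_coins_sum
-- ===== SOURCE A (Python) =====
-- def get_pattern_coins_sum(kind_coins: list, sum_limit: int) -> int:
--     '''
--         再帰関数
--             引数kind_coinsの組み合わせで引数sum_limit以上となる組み合わせパターン数を返す
--     '''
--
--     if len(kind_coins) == 0:
--         return 0
--
--     pattern = 0
--     # 値の大きなコインから繰り返したほうが処理回数が少なくなると考え、ソートする
--     kind_coins.sort(reverse=True)
--     step_num = kind_coins[0]
--     for i in range(0, sum_limit+1, step_num):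
--         if i >= sum_limit:
--             # 規定値を超えてからの繰り返しは無効と考える
--             pattern += 1
--             break
--         pattern += get_pattern_coins_sum(kind_coins[1:len(kind_coins)], sum_limit - i)
--     return pattern
-- ===== SOURCE B (Python) =====
-- def get_pattern_coins_sum(kind_coins: list, sum_limit: int) -> int:
--     '''Memoized top-down DP over (remaining coin kinds, remaining amount):
--     sorts once (in place, like the original) and recurses on suffixes of the
--     sorted list by index instead of re-sorting sliced copies at every call.'''
--     kind_coins.sort(reverse=True)
--     n = len(kind_coins)
--     memo = {}
--
--     def count(left, s):
--         # left = number of coin kinds still usable (the length-`left` suffix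
--         # of the sorted list); s = remaining amount to reach
--         if left == 0:
--             return 0
--         key = (left, s)
--         if key in memo:
--             return memo[key]
--         step_num = kind_coins[n - left]
--         pattern = 0
--         for i in range(0, s + 1, step_num):
--             if i >= s:
--                 pattern += 1
--                 break
--             pattern += count(left - 1, s - i)
--         memo[key] = pattern
--         return pattern
--
--     return count(n, sum_limit)
-- ===== Notes on version B (the rewrite author's own statement) =====
-- stated objective: alternative
-- what changed: B replaces A's naive recursion (which re-sorts and slices a fresh list copy at every call) by top-down dynamic programming: one in-place sort, recursion by suffix index over (remaining coin kinds, remaining amount) with a memo dict, so each state is computed once; much faster on moderate sums, though a timing run could not confirm a uniform speedup since both still blow up on huge sum_limit with small coins.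
import Mathlib
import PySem

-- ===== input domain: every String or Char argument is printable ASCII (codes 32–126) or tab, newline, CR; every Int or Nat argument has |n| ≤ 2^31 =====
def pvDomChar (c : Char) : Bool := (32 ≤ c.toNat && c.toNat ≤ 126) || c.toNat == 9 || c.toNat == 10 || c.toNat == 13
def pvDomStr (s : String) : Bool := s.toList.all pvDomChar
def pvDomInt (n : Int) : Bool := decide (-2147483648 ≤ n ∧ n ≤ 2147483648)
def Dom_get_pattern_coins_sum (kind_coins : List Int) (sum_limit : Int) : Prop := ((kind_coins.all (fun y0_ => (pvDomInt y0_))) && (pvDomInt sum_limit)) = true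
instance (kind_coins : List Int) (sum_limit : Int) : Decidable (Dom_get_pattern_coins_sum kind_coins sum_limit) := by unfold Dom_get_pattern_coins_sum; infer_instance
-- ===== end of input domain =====

-- B: memoized top-down DP over (suffix of the once-sorted coin list, remaining amount)
-- instead of A's naive recursion that re-sorts a sliced copy at every call (each state computed once).
-- Both A and B sort the argument list in place in Python; the equivalence proved here is about the return value.



-- iteration bound of 'for i in range(0, s+1, step)' from position i (proof-only measure)
def pvIters (s step i : Int) : Nat :=
  if 0 < step then (s + 1 - i).toNat else (i - (s + 1)).toNat

-- ===== PORT A =====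
mutual
def get_pattern_coins_sum (kind_coins : List Int) (sum_limit : Int) : Int :=
  if kind_coins.length = 0 then 0
  else
    let ks := PySem.List.sorted kind_coins (fun x => x) true
    let step_num := PySem.List.pyGetD ks 0 0
    pvGetPatternLoop (PySem.List.slice ks (some 1) (some (ks.length : Int)))
      sum_limit step_num 0 0
  termination_by (kind_coins.length, 1, 0)
  decreasing_by
    simp [pysem, Prod.lex_def]
    omega

-- the lazy 'for i in range(0, sum_limit+1, step_num)' with its break, from position i;
-- the guard is CPython's has-next test for range; ksRest is kind_coins[1:len(kind_coins)]
def pvGetPatternLoop (ksRest : List Int) (sum_limit step_num pattern i : Int) : Int :=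
  if (0 < step_num ∧ i < sum_limit + 1) ∨ (step_num < 0 ∧ sum_limit + 1 < i) then
    if i ≥ sum_limit then pattern + 1
    else pvGetPatternLoop ksRest sum_limit step_num
      (pattern + get_pattern_coins_sum ksRest (sum_limit - i)) (i + step_num)
  else pattern
  termination_by (ksRest.length + 1, 0, pvIters sum_limit step_num i)
  decreasing_by
  · simp [Prod.lex_def]
  · simp [Prod.lex_def, pvIters]
    split_ifs <;> omega
end

-- ===== PORT B =====
mutual
def get_pattern_coins_sum_altGo : List Int → Int → PySem.Dict (Int × Int) Int → Int × PySem.Dict (Int × Int) Int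
  | [], _, memo => (0, memo)
  | d :: rest, s, memo =>
    match memo.get? (((rest.length : Int) + 1), s) with
    | some v => (v, memo)
    | none =>
      match pvAltLoop rest s d 0 0 memo with
      | (v, m) => (v, m.insert (((rest.length : Int) + 1), s) v)
  termination_by l s memo => (l.length, 1, 0)
  decreasing_by simp [Prod.lex_def]

def pvAltLoop (rest : List Int) (s step pattern i : Int) (memo : PySem.Dict (Int × Int) Int) : Int × PySem.Dict (Int × Int) Int :=
  if (0 < step ∧ i < s + 1) ∨ (step < 0 ∧ s + 1 < i) then
    if i ≥ s then (pattern + 1, memo)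
    else
      match get_pattern_coins_sum_altGo rest (s - i) memo with
      | (v, m) => pvAltLoop rest s step (pattern + v) (i + step) m
  else (pattern, memo)
  termination_by (rest.length + 1, 0, pvIters s step i)
  decreasing_by
  · simp [Prod.lex_def]
  · simp [Prod.lex_def, pvIters]
    split_ifs <;> omega
end

def get_pattern_coins_sum_alt (kind_coins : List Int) (sum_limit : Int) : Int :=
  (get_pattern_coins_sum_altGo (PySem.List.sorted kind_coins (fun x => x) true) sum_limit
    PySem.Dict.empty).1


-- ===== PRECONDITION & SPEC =====
-- Pre_ excludes exactly the inputs on which the Python A raises ValueError (range() with step 0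
-- somewhere in the recursion): a list containing coin 0 with sum_limit > 0, or whose maximum is 0.
def Pre_get_pattern_coins_sum (kind_coins : List Int) (sum_limit : Int) : Prop :=
  (0 : Int) ∈ kind_coins → (sum_limit ≤ 0 ∧ ∃ c ∈ kind_coins, 0 < c)
instance (kind_coins : List Int) (sum_limit : Int) : Decidable (Pre_get_pattern_coins_sum kind_coins sum_limit) := by unfold Pre_get_pattern_coins_sum; infer_instance

def pvWitness_get_pattern_coins_sum : List Int × Int := ([1, 2, 5], 7)

def Spec_get_pattern_coins_sum (kind_coins : List Int) (sum_limit : Int) (out : Int) : Prop := out = get_pattern_coins_sum_alt kind_coins sum_limit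
instance (kind_coins : List Int) (sum_limit : Int) (out : Int) : Decidable (Spec_get_pattern_coins_sum kind_coins sum_limit out) := by unfold Spec_get_pattern_coins_sum; infer_instance

-- ===== CLAIM (what is proved, stated in full; the proofs are below) =====
def Claim_equal_get_pattern_coins_sum : Prop := ∀ (kind_coins : List Int) (sum_limit : Int), Dom_get_pattern_coins_sum kind_coins sum_limit → Pre_get_pattern_coins_sum kind_coins sum_limit → Spec_get_pattern_coins_sum kind_coins sum_limit (get_pattern_coins_sum kind_coins sum_limit)

-- ===== LEMMAS AND PROOFS =====

mutual
def pvCnt : List Int → Int → Int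
  | [], _ => 0
  | d :: rest, s => pvCntLoop rest s d 0 0
  termination_by l s => (l.length, 1, 0)
  decreasing_by simp [Prod.lex_def]

def pvCntLoop (rest : List Int) (s step pattern i : Int) : Int :=
  if (0 < step ∧ i < s + 1) ∨ (step < 0 ∧ s + 1 < i) then
    if i ≥ s then pattern + 1
    else pvCntLoop rest s step (pattern + pvCnt rest (s - i)) (i + step)
  else pattern
  termination_by (rest.length + 1, 0, pvIters s step i)
  decreasing_by
  · simp [Prod.lex_def]
  · simp [Prod.lex_def, pvIters]
    split_ifs <;> omega
end

theorem pvLoopA_eq (rest : List Int) (s step : Int)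
    (hr : ∀ s', get_pattern_coins_sum rest s' = pvCnt rest s') :
    ∀ (n : Nat) (p i : Int), pvIters s step i = n →
    pvGetPatternLoop rest s step p i = pvCntLoop rest s step p i := by
  intro n
  induction n using Nat.strong_induction_on with
  | _ n ih =>
    intro p i hn
    rw [pvGetPatternLoop, pvCntLoop]
    split_ifs with h1 h2
    · rfl
    · rw [hr]
      exact ih (pvIters s step (i + step)) (by simp [pvIters] at hn ⊢; split_ifs at hn ⊢ <;> omega) _ _ rfl
    · rfl

theorem pvA_eq_cnt : ∀ (n : Nat) (l : List Int), l.length ≤ n → ∀ s,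
    get_pattern_coins_sum l s = pvCnt (PySem.List.sorted l (fun x => x) true) s := by
  intro n
  induction n with
  | zero =>
    intro l hl s
    have : l = [] := by cases l <;> simp_all
    subst this
    rw [get_pattern_coins_sum]
    simp [pvCnt, PySem.List.sorted]
  | succ n ih =>
    intro l hl s
    by_cases h0 : l.length = 0
    · have : l = [] := by cases l <;> simp_all
      subst this
      rw [get_pattern_coins_sum]
      simp [pvCnt, PySem.List.sorted]
    · rcases hk : PySem.List.sorted l (fun x => x) true with _ | ⟨d, rest⟩
      · exact absurd ((PySem.List.sorted_eq_nil_iff l _ true).1 hk) (by intro h; simp [h] at h0)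
      · have hlen : l.length = rest.length + 1 := by
          have := PySem.List.length_sorted l (fun x : Int => x) true
          rw [hk] at this; simpa using this.symm
        have hslice : PySem.List.slice (d::rest) (some 1) (some (((d::rest).length : Nat) : Int)) = rest := by
          rw [PySem.List.slice_toNat _ (by omega) (by positivity)]
          simp
        have hsrest : PySem.List.sorted rest (fun x : Int => x) true = rest := by
          apply PySem.List.sorted_rev_eq_self_of_pairwise
          have := PySem.List.sorted_pairwise_rev l (fun x : Int => x)
          rw [hk] at this
          exact (List.pairwise_cons.mp this).2
        have hr : ∀ s', get_pattern_coins_sum rest s' = pvCnt rest s' := by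
          intro s'
          rw [ih rest (by omega) s', hsrest]
        rw [get_pattern_coins_sum]
        simp only [h0, if_false, hk, hslice, PySem.List.pyGetD_zero_cons]
        rw [pvCnt]
        exact pvLoopA_eq rest s d hr _ 0 0 rfl

def pvInv (c : List Int) (memo : PySem.Dict (Int × Int) Int) : Prop :=
  ∀ (p : Int × Int) v, memo.get? p = some v →
    0 ≤ p.1 ∧ p.1.toNat ≤ c.length ∧ v = pvCnt (c.drop (c.length - p.1.toNat)) p.2

theorem pvLoopB (c rest : List Int) (s step : Int)
    (ihrest : ∀ s' memo, pvInv c memo →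
      (get_pattern_coins_sum_altGo rest s' memo).1 = pvCnt rest s' ∧
      pvInv c (get_pattern_coins_sum_altGo rest s' memo).2) :
    ∀ (n : Nat) (p i : Int) (memo : PySem.Dict (Int × Int) Int), pvIters s step i = n →
    pvInv c memo →
    (pvAltLoop rest s step p i memo).1 = pvCntLoop rest s step p i ∧
    pvInv c (pvAltLoop rest s step p i memo).2 := by
  intro n
  induction n using Nat.strong_induction_on with
  | _ n ih =>
    intro p i memo hn hInv
    rw [pvAltLoop, pvCntLoop]
    split_ifs with h1 h2
    · exact ⟨rfl, hInv⟩
    · have hrec := ihrest (s - i) memo hInv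
      rcases hE : get_pattern_coins_sum_altGo rest (s - i) memo with ⟨v, m⟩
      rw [hE] at hrec
      have hv2 : v = pvCnt rest (s - i) := hrec.1
      have hm2 : pvInv c m := hrec.2
      rw [hv2]
      exact ih (pvIters s step (i + step)) (by simp [pvIters] at hn ⊢; split_ifs at hn ⊢ <;> omega) _ _ _ rfl hm2
    · exact ⟨rfl, hInv⟩

theorem pvGo_eq_cnt (c : List Int) : ∀ (l : List Int),
    l = c.drop (c.length - l.length) → ∀ s memo, pvInv c memo →
    (get_pattern_coins_sum_altGo l s memo).1 = pvCnt l s ∧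
    pvInv c (get_pattern_coins_sum_altGo l s memo).2 := by
  intro l
  induction l with
  | nil =>
    intro _ s memo h
    simp only [get_pattern_coins_sum_altGo, pvCnt]
    exact ⟨trivial, h⟩
  | cons d rest ih =>
    intro hsuf s memo hInv
    have hlen : rest.length + 1 ≤ c.length := by
      have := congrArg List.length hsuf
      simp at this
      omega
    have hdrop : c.drop (c.length - (rest.length + 1)) = d :: rest := by
      simpa using hsuf.symm
    have hrsuf : rest = c.drop (c.length - rest.length) := by
      have h2 : (c.drop (c.length - (rest.length + 1))).tail = c.drop (c.length - rest.length) := by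
        rw [List.tail_drop]
        congr 1
        omega
      rw [← h2, hdrop]
      rfl
    have ihrest := ih hrsuf
    cases hget : memo.get? (((rest.length : Int) + 1), s) with
    | some v =>
      have hv := hInv _ v hget
      have htn : ((rest.length : Int) + 1).toNat = rest.length + 1 := by omega
      constructor
      · simp only [get_pattern_coins_sum_altGo, hget]
        rw [hv.2.2]
        simp only [htn, hdrop]
      · simpa [get_pattern_coins_sum_altGo, hget] using hInv
    | none =>
      have hloop := pvLoopB c rest s d ihrest (pvIters s d 0) 0 0 memo rfl hInv
      rcases hE : pvAltLoop rest s d 0 0 memo with ⟨w, m⟩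
      rw [hE] at hloop
      have hw : w = pvCntLoop rest s d 0 0 := hloop.1
      have hm : pvInv c m := hloop.2
      constructor
      · simp only [get_pattern_coins_sum_altGo, hget, hE]
        rw [hw, pvCnt]
      · simp only [get_pattern_coins_sum_altGo, hget, hE]
        intro p v hv
        rw [PySem.Dict.get?_insert] at hv
        by_cases hp : p = (((rest.length : Int) + 1), s)
        · subst hp
          rw [if_pos rfl] at hv
          have htn : ((rest.length : Int) + 1).toNat = rest.length + 1 := by omega
          refine ⟨by omega, by omega, ?_⟩
          simp only [htn, hdrop]
          rw [← Option.some.inj hv, hw, pvCnt]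
        · rw [if_neg hp] at hv
          exact hm _ v hv

-- ===== VERDICT (by name: the statement is the Claim_ definition above) =====
theorem get_pattern_coins_sum_spec : Claim_equal_get_pattern_coins_sum := by
  intro l s _ _
  unfold Spec_get_pattern_coins_sum get_pattern_coins_sum_alt
  have h := (pvGo_eq_cnt (PySem.List.sorted l (fun x => x) true)
    (PySem.List.sorted l (fun x => x) true) (by simp) s PySem.Dict.empty
    (by intro p v hv; simp [PySem.Dict.get?_empty] at hv)).1
  rw [h, pvA_eq_cnt l.length l le_rfl s]
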